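-- pv_equiv track=rewrite | github.com/Alexander-philip-sage/algorithm_challenges | question_mark.py | question_mark
-- ===== SOURCE A (Python) =====
-- def question_mark(var):
--     questions = []
--     numbers = []
--     pair_found = False
--     for i,letter in enumerate(var):
--         if letter=='?':
--             questions.append(1)
--         else:
--             questions.append(0)
--         if letter.isdigit():
--             num = int(letter)
--             if i>0:
--                 if (num+numbers[-1])==10:
--                     return False
--                 compliment = 10 - num
--                 for j in reversed(range(len(numbers))):
--                     tmp = numbers[j]
--                     if tmp == compliment:
--                         ct_questions = sum(questions[j:i+1])
--                         if ct_questions!=3: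
--                             return False
--                         else:
--                             pair_found=True
--                             break
--             numbers.append(num)
--         else:
--             numbers.append(0)
--     if pair_found:
--         return True
--     else:
--         return False
-- ===== SOURCE B (Python) =====
-- def question_mark(var):
--     # One pass: running count of question-mark characters seen so far, plus dict mapping each digit
--     # value to the count recorded at its most recent occurrence.
--     q = 0
--     last = {}
--     pair_found = False
--     for ch in var:
--         if ch == '?':
--             q += 1
--         elif ch.isdigit():
--             n = int(ch)
--             c = 10 - n
--             if c in last:
--                 if q - last[c] != 3:
--                     return False
--                 pair_found = True
--             last[n] = q
--     return pair_found
-- ===== Notes on version B (the rewrite author's own statement) =====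
-- stated objective: faster
-- what changed: replaces the per-digit backward scan over all previous positions plus a slice-sum (quadratic) by a single pass keeping a running question-mark count and a dict from digit value to the count at its last occurrence
import Mathlib
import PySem

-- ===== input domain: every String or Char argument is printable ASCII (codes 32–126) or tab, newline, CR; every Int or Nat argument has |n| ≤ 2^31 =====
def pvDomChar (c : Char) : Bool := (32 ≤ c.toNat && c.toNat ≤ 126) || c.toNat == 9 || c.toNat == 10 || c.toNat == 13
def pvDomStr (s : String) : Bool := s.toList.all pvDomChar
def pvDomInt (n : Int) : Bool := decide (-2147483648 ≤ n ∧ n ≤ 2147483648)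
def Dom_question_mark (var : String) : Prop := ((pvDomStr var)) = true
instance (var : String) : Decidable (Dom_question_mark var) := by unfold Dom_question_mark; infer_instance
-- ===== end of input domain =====

-- B replaces A's quadratic backward scan per digit by one pass with a running
-- question-mark count and a dict of the count at each digit's last occurrence (faster).

-- ===== PORT A =====
-- inner loop 'for j in reversed(range(len(numbers)))'; fuel = j+1 (scans j, j-1, …, 0)
-- numbers[j] is always in range here, so List.getD is exact for the Python indexing
def qmInner (numbers questions : List Int) (i : Nat) (compliment : Int) : Nat → Option Bool
  | 0 => none
  | j+1 =>
    let tmp := numbers.getD j 0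
    if tmp = compliment then
      let ct := (PySem.List.slice questions (some (j : Int)) (some ((i : Int) + 1))).sum
      if ct ≠ 3 then some false else some true
    else qmInner numbers questions i compliment j

def qmLoop : List Char → Nat → List Int → List Int → Bool → Bool
  | [], _, _, _, pair_found => pair_found
  | letter :: rest, i, questions, numbers, pair_found =>
    let questions := questions ++ [if letter = '?' then (1 : Int) else 0]
    if letter.isDigit then
      let num : Int := (letter.toNat : Int) - 48
      if 0 < i then
        if num + PySem.List.pyGetD numbers (-1) 0 = 10 then false
        else
          match qmInner numbers questions i (10 - num) numbers.length with
          | some false => false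
          | some true  => qmLoop rest (i+1) questions (numbers ++ [num]) true
          | none       => qmLoop rest (i+1) questions (numbers ++ [num]) pair_found
      else qmLoop rest (i+1) questions (numbers ++ [num]) pair_found
    else qmLoop rest (i+1) questions (numbers ++ [0]) pair_found

def question_mark (var : String) : Bool := qmLoop var.toList 0 [] [] false

-- ===== PORT B =====
def qmAltLoop : List Char → Int → PySem.Dict Int Int → Bool → Bool
  | [], _, _, pair_found => pair_found
  | ch :: rest, q, last, pair_found =>
    if ch = '?' then qmAltLoop rest (q+1) last pair_found
    else if ch.isDigit then
      let n : Int := (ch.toNat : Int) - 48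
      let c : Int := 10 - n
      match last.get? c with
      | some s =>
        if q - s ≠ 3 then false
        else qmAltLoop rest q (last.insert n q) true
      | none => qmAltLoop rest q (last.insert n q) pair_found
    else qmAltLoop rest q last pair_found

def question_mark_alt (var : String) : Bool := qmAltLoop var.toList 0 PySem.Dict.empty false

-- ===== PRECONDITION & SPEC =====
def Spec_question_mark (var : String) (out : Bool) : Prop := out = question_mark_alt var
instance (var : String) (out : Bool) : Decidable (Spec_question_mark var out) := by unfold Spec_question_mark; infer_instance

-- ===== CLAIM (what is proved, stated in full; the proofs are below) =====
def Claim_equal_question_mark : Prop := ∀ (var : String), Dom_question_mark var → Spec_question_mark var (question_mark var)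

-- ===== LEMMAS AND PROOFS =====

-- index of the last occurrence of c among numbers[0..k-1] (downward scan, like A's inner loop)
def lastIdx (numbers : List Int) (c : Int) : Nat → Option Nat
  | 0 => none
  | j+1 => if numbers.getD j 0 = c then some j else lastIdx numbers c j

lemma lastIdx_lt (numbers : List Int) (c : Int) :
    ∀ k j, lastIdx numbers c k = some j → j < k := by
  intro k
  induction k with
  | zero => intro j h; simp [lastIdx] at h
  | succ m ih =>
    intro j h
    simp only [lastIdx] at h
    split at h
    · cases h; omega
    · exact Nat.lt_succ_of_lt (ih j h)

lemma lastIdx_congr (xs ys : List Int) (c : Int) :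
    ∀ k, (∀ j, j < k → xs.getD j 0 = ys.getD j 0) → lastIdx xs c k = lastIdx ys c k := by
  intro k
  induction k with
  | zero => intro _; rfl
  | succ m ih =>
    intro h
    simp only [lastIdx, h m (Nat.lt_succ_self m), ih (fun j hj => h j (Nat.lt_succ_of_lt hj))]

lemma lastIdx_append (xs : List Int) (v c : Int) :
    lastIdx (xs ++ [v]) c (xs.length + 1)
      = if v = c then some xs.length else lastIdx xs c xs.length := by
  have h1 : (xs ++ [v]).getD xs.length 0 = v := by
    simp [List.getD]
  simp only [lastIdx, h1]
  rw [lastIdx_congr (xs ++ [v]) xs c xs.length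
    (fun j hj => by simp [List.getD, List.getElem?_append_left hj])]

lemma lastIdx_getLast (xs : List Int) (c : Int) (hne : xs ≠ [])
    (h : xs.getD (xs.length - 1) 0 = c) :
    lastIdx xs c xs.length = some (xs.length - 1) := by
  obtain ⟨m, hm⟩ : ∃ m, xs.length = m + 1 := by
    cases xs with
    | nil => exact absurd rfl hne
    | cons a l => exact ⟨l.length, rfl⟩
  have h' : xs.getD m 0 = c := by rw [hm] at h; simpa using h
  rw [hm]
  simp only [lastIdx]
  rw [if_pos h']
  simp

-- A's inner loop computes: find the last j with numbers[j] = c, test the slice sum there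
lemma qmInner_eq (numbers questions : List Int) (i : Nat) (c : Int) :
    ∀ k, qmInner numbers questions i c k
      = (lastIdx numbers c k).map (fun (j : Nat) =>
          if (PySem.List.slice questions (some ((j : Nat) : Int)) (some ((i : Int) + 1))).sum ≠ 3
          then false else true) := by
  intro k
  induction k with
  | zero => rfl
  | succ m ih =>
    simp only [qmInner, lastIdx]
    by_cases hgd : numbers.getD m 0 = c
    · rw [if_pos hgd, if_pos hgd]
      simp only [Option.map_some]
      split <;> simp_all
    · rw [if_neg hgd, if_neg hgd]
      exact ih

-- the invariant tying A's (questions, numbers) state to B's (q, last) state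
abbrev QInv (questions numbers : List Int) (q : Int) (last : PySem.Dict Int Int) : Prop :=
  questions.length = numbers.length ∧
  q = questions.sum ∧
  (∀ x ∈ numbers, 0 ≤ x ∧ x ≤ 9) ∧
  (∀ c : Int, c ≠ 0 →
    match lastIdx numbers c numbers.length with
    | none => last.get? c = none
    | some j => last.get? c = some ((questions.take j).sum) ∧ questions.getD j 0 = 0)

lemma isDigit_bounds (ch : Char) (h : ch.isDigit = true) :
    0 ≤ (ch.toNat : Int) - 48 ∧ (ch.toNat : Int) - 48 ≤ 9 := by
  simp [Char.isDigit, decide_eq_true_eq] at h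
  have h1 : 48 ≤ ch.toNat := h.1
  have h2 : ch.toNat ≤ 57 := h.2
  constructor <;> [omega; omega]

lemma sum_take_getD (xs : List Int) (j : Nat) (hj : j < xs.length) :
    (xs.take (j+1)).sum = (xs.take j).sum + xs.getD j 0 := by
  rw [List.sum_take_succ _ _ hj, List.getD_eq_getElem xs 0 hj]

-- main simulation lemma
lemma loop_eq (rest : List Char) :
    ∀ (questions numbers : List Int) (q : Int) (last : PySem.Dict Int Int) (pf : Bool),
    QInv questions numbers q last →
    qmLoop rest numbers.length questions numbers pf = qmAltLoop rest q last pf := by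
  induction rest with
  | nil => intro _ _ _ _ _ _; rfl
  | cons ch rest ih =>
    intro questions numbers q last pf hInv
    obtain ⟨hlen, hq, hbnd, hrel⟩ := hInv
    by_cases hqm : ch = '?'
    · -- '?' branch: '?' is not a digit
      subst hqm
      have hnd : ('?' : Char).isDigit = false := by decide
      simp only [qmLoop, qmAltLoop, hnd, if_true, if_false, Bool.false_eq_true, ite_true]
      have : numbers.length + 1 = (numbers ++ [(0 : Int)]).length := by simp
      rw [this, ih (questions ++ [1]) (numbers ++ [0]) (q+1) last pf]
      refine ⟨by simp [hlen], by simp [hq], ?_, ?_⟩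
      · intro x hx
        rcases List.mem_append.mp hx with h | h
        · exact hbnd x h
        · simp at h; omega
      · intro c hc
        have hL : (numbers ++ [(0:Int)]).length = numbers.length + 1 := by simp
        rw [hL, lastIdx_append numbers 0 c]
        rw [if_neg (fun h => hc h.symm)]
        have := hrel c hc
        cases hli : lastIdx numbers c numbers.length with
        | none => rw [hli] at this; simpa using this
        | some j =>
          rw [hli] at this
          have hjlt : j < numbers.length := lastIdx_lt numbers c _ j hli
          have hjq : j < questions.length := by omega
          refine ⟨?_, ?_⟩
          · rw [List.take_append_of_le_length (by omega)]; exact this.1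
          · rw [List.getD, List.getElem?_append_left hjq]; exact this.2
    · by_cases hdig : ch.isDigit
      · -- digit branch (ch ≠ '?')
        have hnum := isDigit_bounds ch hdig
        set num : Int := (ch.toNat : Int) - 48 with hnumdef
        have hc0 : (10 : Int) - num ≠ 0 := by omega
        have hrelc := hrel (10 - num) hc0
        simp only [qmLoop, qmAltLoop, hdig, hqm, if_false, ite_true, if_true,
          Bool.false_eq_true, ite_false]
        by_cases hi : 0 < numbers.length
        · have hnne : numbers ≠ [] := by
            cases numbers with
            | nil => simp at hi
            | cons a l => simp
          simp only [hi, if_true]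
          rw [qmInner_eq]
          -- relate the tail element with lastIdx
          cases hli : lastIdx numbers (10 - num) numbers.length with
          | none =>
            rw [hli] at hrelc
            have hgl_eq : numbers.getLast hnne = numbers.getD (numbers.length - 1) 0 := by
              rw [List.getLast_eq_getElem, List.getD_eq_getElem numbers 0
                (by cases numbers with | nil => exact absurd rfl hnne | cons a l => simp)]
            have hadj : ¬ (num + PySem.List.pyGetD numbers (-1) 0 = 10) := by
              intro h
              have hg : numbers.getD (numbers.length - 1) 0 = 10 - num := by
                rw [PySem.List.pyGetD_neg_one numbers 0 hnne, hgl_eq] at h; omega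
              have := lastIdx_getLast numbers (10 - num) hnne hg
              rw [this] at hli; cases hli
            rw [if_neg hadj]
            simp only [Option.map_none]
            rw [hrelc]
            have : numbers.length + 1 = (numbers ++ [num]).length := by simp
            rw [this, ih (questions ++ [0]) (numbers ++ [num]) q (last.insert num q) pf]
            exact ⟨by simp [hlen], by simp [hq], by
              intro x hx
              rcases List.mem_append.mp hx with h | h
              · exact hbnd x h
              · simp at h; omega, by
              intro c hc
              have hL : (numbers ++ [num]).length = numbers.length + 1 := by simp
              rw [hL, lastIdx_append numbers num c]
              by_cases hcn : num = c
              · subst hcn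
                rw [if_pos rfl]
                refine ⟨?_, ?_⟩
                · rw [PySem.Dict.get?_insert_self,
                    List.take_append_of_le_length (le_of_eq hlen.symm),
                    List.take_of_length_le (le_of_eq hlen), hq]
                · simp [List.getD, hlen]
              · rw [if_neg hcn, PySem.Dict.get?_insert_of_ne last q (fun h => hcn h.symm)]
                have := hrel c hc
                cases hli2 : lastIdx numbers c numbers.length with
                | none => rw [hli2] at this; simpa using this
                | some j =>
                  rw [hli2] at this
                  have hjlt : j < numbers.length := lastIdx_lt numbers c _ j hli2
                  have hjq : j < questions.length := by omega
                  exact ⟨by rw [List.take_append_of_le_length (by omega)]; exact this.1,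
                    by rw [List.getD, List.getElem?_append_left hjq]; exact this.2⟩⟩
          | some j =>
            rw [hli] at hrelc
            obtain ⟨hget, hq0⟩ := hrelc
            have hjlt : j < numbers.length := lastIdx_lt numbers _ _ j hli
            have hjq : j < questions.length := by omega
            -- the question-mark count between j and the current position, as computed by A
            have hslice :
                (PySem.List.slice (questions ++ [(0:Int)]) (some (j : Int))
                  (some ((numbers.length : Int) + 1))).sum
                = q - (questions.take j).sum := by
              have hcast : ((numbers.length : Int) + 1) = ((numbers.length + 1 : Nat) : Int) := by
                push_cast; ring
              rw [hcast, PySem.List.slice_natCast]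
              have hlen' : (questions ++ [(0:Int)]).length = numbers.length + 1 := by
                simp [hlen]
              have htk : ((questions ++ [(0:Int)]).drop j).take (numbers.length + 1 - j)
                  = (questions ++ [(0:Int)]).drop j := by
                apply List.take_of_length_le
                rw [List.length_drop, hlen']
              rw [htk]
              have hsplit := List.sum_take_add_sum_drop (questions ++ [(0:Int)]) j
              have htkj : (questions ++ [(0:Int)]).take j = questions.take j := by
                rw [List.take_append_of_le_length (by omega)]
              rw [htkj] at hsplit
              have hsum0 : (questions ++ [(0:Int)]).sum = q := by simp [hq]
              omega
            rw [hget]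
            by_cases hadj : num + PySem.List.pyGetD numbers (-1) 0 = 10
            · -- A returns False at the adjacent check; B finds count 0 ≠ 3
              rw [if_pos hadj]
              -- numbers.getLast = 10 - num, so j = numbers.length - 1
              have hgl_eq : numbers.getLast hnne = numbers.getD (numbers.length - 1) 0 := by
                rw [List.getLast_eq_getElem, List.getD_eq_getElem numbers 0
                  (by cases numbers with | nil => exact absurd rfl hnne | cons a l => simp)]
              have hgl : numbers.getD (numbers.length - 1) 0 = 10 - num := by
                rw [PySem.List.pyGetD_neg_one numbers 0 hnne, hgl_eq] at hadj; omega
              have hjeq : j = numbers.length - 1 := by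
                have := lastIdx_getLast numbers (10 - num) hnne hgl
                rw [this] at hli; cases hli; rfl
              -- q - sum(take j) = questions[j] = 0
              have hqj : q - (questions.take j).sum = 0 := by
                have h1 : (questions.take (j+1)).sum = (questions.take j).sum := by
                  rw [sum_take_getD questions j hjq, hq0]; ring
                have h2 : questions.take (j+1) = questions := by
                  apply List.take_of_length_le; omega
                rw [h2] at h1
                omega
              show false = if q - (List.take j questions).sum ≠ 3 then false
                else qmAltLoop rest q (last.insert num q) true
              rw [if_pos (by omega)]
            · rw [if_neg hadj]
              simp only [Option.map_some]
              rw [hslice]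
              by_cases hct : q - (questions.take j).sum ≠ 3
              · rw [if_pos hct, if_pos hct]
              · rw [if_neg hct, if_neg hct]
                have : numbers.length + 1 = (numbers ++ [num]).length := by simp
                rw [this, ih (questions ++ [0]) (numbers ++ [num]) q (last.insert num q) true]
                exact ⟨by simp [hlen], by simp [hq], by
                  intro x hx
                  rcases List.mem_append.mp hx with h | h
                  · exact hbnd x h
                  · simp at h; omega, by
                  intro c hc
                  have hL : (numbers ++ [num]).length = numbers.length + 1 := by simp
                  rw [hL, lastIdx_append numbers num c]
                  by_cases hcn : num = c
                  · subst hcn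
                    rw [if_pos rfl]
                    refine ⟨?_, ?_⟩
                    · rw [PySem.Dict.get?_insert_self,
                        List.take_append_of_le_length (le_of_eq hlen.symm),
                        List.take_of_length_le (le_of_eq hlen), hq]
                    · simp [List.getD, hlen]
                  · rw [if_neg hcn, PySem.Dict.get?_insert_of_ne last q (fun h => hcn h.symm)]
                    have := hrel c hc
                    cases hli2 : lastIdx numbers c numbers.length with
                    | none => rw [hli2] at this; simpa using this
                    | some j' =>
                      rw [hli2] at this
                      have hjlt' : j' < numbers.length := lastIdx_lt numbers c _ j' hli2
                      have hjq' : j' < questions.length := by omega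
                      exact ⟨by rw [List.take_append_of_le_length (by omega)]; exact this.1,
                        by rw [List.getD, List.getElem?_append_left hjq']; exact this.2⟩⟩
        · -- i = 0: numbers = []
          have hnil : numbers = [] := by
            cases numbers with
            | nil => rfl
            | cons a l => simp at hi
          subst hnil
          have hqnil : questions = [] := List.eq_nil_of_length_eq_zero (by simpa using hlen)
          subst hqnil
          have hget : last.get? (10 - num) = none := by
            have := hrel (10 - num) hc0
            simpa [lastIdx] using this
          simp only [List.length_nil, lt_irrefl, if_false, List.nil_append]
          rw [hget]
          show qmLoop rest (0+1) [0] [num] pf = qmAltLoop rest q (last.insert num q) pf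
          rw [show (0:Nat) + 1 = ([num] : List Int).length from by simp]
          apply ih
          refine ⟨by simp, by simp [hq], by intro x hx; simp at hx; omega, ?_⟩
          intro c hc
          simp only [List.length_singleton]
          have : lastIdx [num] c 1 = if num = c then some 0 else none := by
            simp [lastIdx]
          rw [this]
          by_cases hcn : num = c
          · subst hcn
            rw [if_pos rfl]
            exact ⟨by rw [PySem.Dict.get?_insert_self]; simp [hq], by simp⟩
          · rw [if_neg hcn, PySem.Dict.get?_insert_of_ne last q (fun h => hcn h.symm)]
            have := hrel c hc
            simpa [lastIdx] using this
      · -- neither '?' nor digit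
        simp only [qmLoop, qmAltLoop, hqm, hdig, if_false, Bool.false_eq_true]
        have : numbers.length + 1 = (numbers ++ [(0:Int)]).length := by simp
        rw [this, ih (questions ++ [0]) (numbers ++ [0]) q last pf]
        refine ⟨by simp [hlen], by simp [hq], ?_, ?_⟩
        · intro x hx
          rcases List.mem_append.mp hx with h | h
          · exact hbnd x h
          · simp at h; omega
        · intro c hc
          have hL : (numbers ++ [(0:Int)]).length = numbers.length + 1 := by simp
          rw [hL, lastIdx_append numbers 0 c]
          rw [if_neg (fun h => hc h.symm)]
          have := hrel c hc
          cases hli : lastIdx numbers c numbers.length with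
          | none => rw [hli] at this; simpa using this
          | some j =>
            rw [hli] at this
            have hjlt : j < numbers.length := lastIdx_lt numbers c _ j hli
            have hjq : j < questions.length := by omega
            exact ⟨by rw [List.take_append_of_le_length (by omega)]; exact this.1,
              by rw [List.getD, List.getElem?_append_left hjq]; exact this.2⟩

-- ===== VERDICT (by name: the statement is the Claim_ definition above) =====
theorem question_mark_spec : Claim_equal_question_mark := by
  intro var _
  unfold Spec_question_mark question_mark question_mark_alt
  rw [show (0:Nat) = ([] : List Int).length from rfl,
    loop_eq var.toList [] [] 0 PySem.Dict.empty false]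
  refine ⟨rfl, rfl, by simp, ?_⟩
  intro c hc
  simp [lastIdx, PySem.Dict.get?_empty]
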